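-- pv_equiv track=rewrite | github.com/linhdvu14/cp-sols | sols/CodeForces/1831_d2/B_Array_merging.py | solve
-- ===== SOURCE A (Python) =====
-- def solve(N, A, B):
--     def f(A):
--         cnt = {}
--         c = 0
--         for i, a in enumerate(A):
--             if i and a != A[i - 1]: c = 0
--             c += 1
--             cnt[a] = max(cnt.get(a, 0), c)
--         return cnt
--
--     ca, cb = f(A), f(B)
--     res = 1
--     for k in set(list(ca.keys()) + list(cb.keys())):
--         res = max(res, ca.get(k, 0) + cb.get(k, 0))
--
--     return res
-- ===== SOURCE B (Python) =====
-- def solve(N, A, B):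
--     # Sort-merge: run-length encode both arrays, sort the tagged runs by value,
--     # and take the answer from one linear scan over the sorted runs.
--     def runs(arr):
--         if not arr:
--             return []
--         out = []
--         cur, c = arr[0], 1
--         for x in arr[1:]:
--             if x == cur:
--                 c += 1
--             else:
--                 out.append((cur, c))
--                 cur, c = x, 1
--         out.append((cur, c))
--         return out
--
--     tagged = [(v, 0, l) for v, l in runs(A)] + [(v, 1, l) for v, l in runs(B)]
--     tagged = sorted(tagged, key=lambda t: t[0])
--     res = 1
--     cur = None
--     b0 = b1 = 0
--     for v, side, l in tagged:
--         if v != cur: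
--             res = max(res, b0 + b1)
--             cur, b0, b1 = v, 0, 0
--         if side == 0:
--             b0 = max(b0, l)
--         else:
--             b1 = max(b1, l)
--     return max(res, b0 + b1)
-- ===== Notes on version B (the rewrite author's own statement) =====
-- stated objective: alternative
-- what changed: A aggregates per-value maximum run lengths into two dicts and maximizes over the merged key set; B is a sort-merge algorithm: it run-length encodes both arrays, sorts the tagged runs by value, and computes the answer in one linear scan over the sorted runs, grouping equal values and adding the per-side maxima.
import Mathlib
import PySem

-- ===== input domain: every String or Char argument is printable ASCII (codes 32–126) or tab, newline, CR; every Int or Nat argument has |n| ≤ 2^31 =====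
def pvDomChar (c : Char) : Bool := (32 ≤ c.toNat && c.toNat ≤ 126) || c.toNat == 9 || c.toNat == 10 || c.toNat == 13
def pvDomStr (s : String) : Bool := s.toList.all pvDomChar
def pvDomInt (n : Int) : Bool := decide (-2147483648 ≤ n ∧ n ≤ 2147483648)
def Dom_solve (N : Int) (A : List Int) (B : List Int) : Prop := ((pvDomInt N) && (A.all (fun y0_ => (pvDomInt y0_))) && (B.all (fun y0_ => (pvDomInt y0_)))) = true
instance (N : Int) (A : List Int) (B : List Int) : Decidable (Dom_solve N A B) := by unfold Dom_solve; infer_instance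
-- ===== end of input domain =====

-- B replaces A's dict-based per-value aggregation with a sort-merge algorithm (run-length encode both
-- arrays, sort the tagged runs by value, one linear scan over the sorted runs); alternative, same result.

-- ===== PORT A =====
-- f: index loop comparing each element with A[i-1], resetting a counter, cnt[a] = max(cnt.get(a,0), c)
def fA (arr : List Int) : PySem.Dict Int Int :=
  ((PySem.List.enumerate arr).foldl (fun s p =>
      let c : Int := if p.1 ≠ 0 ∧ some p.2 ≠ PySem.List.pyGet? arr (p.1 - 1) then 0 else s.2
      let c' := c + 1
      (s.1.insert p.2 (max (s.1.getD p.2 0) c'), c'))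
    (PySem.Dict.empty, 0)).1

def solve (N : Int) (A : List Int) (B : List Int) : Int :=
  let ca := fA A
  let cb := fA B
  (PySem.Set.ofList (ca.keys ++ cb.keys)).foldl
    (fun res k => max res (ca.getD k 0 + cb.getD k 0)) 1

-- ===== PORT B =====
-- runs(arr): run-length encoding, a fold carrying (out, cur, c), flushing (cur, c) on a value change
def runsB (arr : List Int) : List (Int × Int) :=
  match arr with
  | [] => []
  | x0 :: rest =>
    let s := rest.foldl (fun (s : List (Int × Int) × Int × Int) x =>
        if x = s.2.1 then (s.1, s.2.1, s.2.2 + 1)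
        else (s.1 ++ [(s.2.1, s.2.2)], x, 1)) ([], x0, 1)
    s.1 ++ [(s.2.1, s.2.2)]

-- one scan step over a (value, side, length) triple: flush the group on a value change, then
-- update the running maximum of the triple's side
def stepScan (s : Int × Option Int × Int × Int) (t : Int × Int × Int) : Int × Option Int × Int × Int :=
  let s' := if some t.1 ≠ s.2.1 then (max s.1 (s.2.2.1 + s.2.2.2), some t.1, (0:Int), (0:Int)) else s
  if t.2.1 = 0 then (s'.1, s'.2.1, max s'.2.2.1 t.2.2, s'.2.2.2)
  else (s'.1, s'.2.1, s'.2.2.1, max s'.2.2.2 t.2.2)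

def solve_alt (N : Int) (A : List Int) (B : List Int) : Int :=
  let tagged := (runsB A).map (fun p => (p.1, (0:Int), p.2)) ++ (runsB B).map (fun p => (p.1, (1:Int), p.2))
  let tg := PySem.List.sorted tagged (fun t => t.1) false
  let s := tg.foldl stepScan (1, none, 0, 0)
  max s.1 (s.2.2.1 + s.2.2.2)

-- ===== PRECONDITION & SPEC =====
def Spec_solve (N : Int) (A : List Int) (B : List Int) (out : Int) : Prop := out = solve_alt N A B
instance (N : Int) (A : List Int) (B : List Int) (out : Int) : Decidable (Spec_solve N A B out) := by unfold Spec_solve; infer_instance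

-- ===== CLAIM (what is proved, stated in full; the proofs are below) =====
def Claim_equal_solve : Prop := ∀ (N : Int) (A : List Int) (B : List Int), Dom_solve N A B → Spec_solve N A B (solve N A B)

-- ===== LEMMAS AND PROOFS =====

-- ---- proof-side reference definitions ----

-- run-length encoding, recursively
def runsAux (v : Int) (c : Int) : List Int → List (Int × Int)
  | [] => [(v, c)]
  | x :: xs => if x = v then runsAux v (c + 1) xs else (v, c) :: runsAux x 1 xs

def runsR : List Int → List (Int × Int)
  | [] => []
  | x :: xs => runsAux x 1 xs

-- reference form of A's run-length counting loop, with (previous value, current count) state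
def loopSpec (prev : Int) (c : Int) (cnt : PySem.Dict Int Int) : List Int → PySem.Dict Int Int
  | [] => cnt
  | x :: xs =>
      let c' : Int := if x = prev then c + 1 else 1
      loopSpec x c' (cnt.insert x (max (cnt.getD x 0) c')) xs

-- A's dict, rebuilt from the run list
def dictOfRuns (rs : List (Int × Int)) : PySem.Dict Int Int :=
  rs.foldl (fun cnt p => cnt.insert p.1 (max (cnt.getD p.1 0) p.2)) PySem.Dict.empty

-- running maximum of a list, floored at 0
def mx (xs : List Int) : Int := xs.foldl max 0

-- maximum run length of value v in arr (0 if absent)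
def M (arr : List Int) (v : Int) : Int := mx (((runsR arr).filter (fun p => p.1 = v)).map (·.2))

-- per-side maxima of a tagged run list at value w
def n0 (l : List (Int × Int × Int)) (w : Int) : Int :=
  mx ((l.filter (fun t => t.1 = w ∧ t.2.1 = 0)).map (fun t => t.2.2))
def n1 (l : List (Int × Int × Int)) (w : Int) : Int :=
  mx ((l.filter (fun t => t.1 = w ∧ t.2.1 ≠ 0)).map (fun t => t.2.2))

-- the distinct first components, first occurrences in order
def dvals : List (Int × Int × Int) → List Int
  | [] => []
  | p :: t => p.1 :: dvals (t.filter (fun q => q.1 ≠ p.1))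
termination_by l => l.length
decreasing_by
  simp only [List.length_cons, Nat.lt_succ_iff, List.length_unattach]
  exact le_trans (List.length_filter_le _ _) (by simp)

-- ---- generic max-fold lemmas ----

theorem foldl_max_pull (h : Int → Int) (l : List Int) : ∀ (b c : Int),
    l.foldl (fun r w => max r (h w)) (max b c) = max b (l.foldl (fun r w => max r (h w)) c) := by
  induction l with
  | nil => intro b c; rfl
  | cons x t ih =>
    intro b c
    simp only [List.foldl_cons, max_assoc]
    exact ih b (max c (h x))

theorem mx_cons (a : Int) (xs : List Int) : mx (a :: xs) = max a (mx xs) := by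
  have := foldl_max_pull (fun w => w) xs a 0
  simpa [mx, max_comm (0:Int) a] using this

theorem mx_nonneg (xs : List Int) : 0 ≤ mx xs := by
  induction xs with
  | nil => simp [mx]
  | cons a t ih => rw [mx_cons]; exact le_max_of_le_right ih

theorem mx_perm {l₁ l₂ : List Int} (hp : l₁.Perm l₂) : mx l₁ = mx l₂ := by
  induction hp with
  | nil => rfl
  | cons x _ ih => rw [mx_cons, mx_cons, ih]
  | swap x y t => rw [mx_cons, mx_cons, mx_cons, mx_cons, ← max_assoc, max_comm y x, max_assoc]
  | trans _ _ ih₁ ih₂ => rw [ih₁, ih₂]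

theorem foldl_hmax_perm (h : Int → Int) {l₁ l₂ : List Int} (hp : l₁.Perm l₂) :
    ∀ b : Int, l₁.foldl (fun r w => max r (h w)) b = l₂.foldl (fun r w => max r (h w)) b := by
  induction hp with
  | nil => intro b; rfl
  | cons x _ ih => intro b; simp only [List.foldl_cons]; exact ih _
  | swap x y t =>
    intro b
    simp only [List.foldl_cons, max_assoc, max_comm (h y) (h x)]
  | trans _ _ ih₁ ih₂ => intro b; rw [ih₁, ih₂]

-- ---- A's dict = dict of runs ----

-- A's loop from position j on (prev = arr[j-1], counter c) is loopSpec
theorem lemA (xs : List Int) : ∀ (arr : List Int) (j : Nat) (prev c : Int) (cnt : PySem.Dict Int Int),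
    1 ≤ j → arr.drop (j - 1) = prev :: xs →
    ((PySem.List.enumerate xs (j : Int)).foldl (fun s p =>
        let c : Int := if p.1 ≠ 0 ∧ some p.2 ≠ PySem.List.pyGet? arr (p.1 - 1) then 0 else s.2
        let c' := c + 1
        (s.1.insert p.2 (max (s.1.getD p.2 0) c'), c'))
      (cnt, c)).1 = loopSpec prev c cnt xs := by
  induction xs with
  | nil => intro arr j prev c cnt hj hdrop; simp [PySem.List.enumerate, loopSpec]
  | cons x xs ih =>
    intro arr j prev c cnt hj hdrop
    have hget : PySem.List.pyGet? arr ((j : Int) - 1) = some prev := by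
      have h1 : ((j : Int) - 1) = ((j - 1 : Nat) : Int) := by omega
      have h2 : arr[(j-1)]? = some prev := by
        rw [← List.head?_drop, hdrop]; rfl
      rw [h1, PySem.List.pyGet?_natCast, h2]
    have hj0 : (j : Int) ≠ 0 := by omega
    have hdrop' : arr.drop ((j+1) - 1) = x :: xs := by
      have h : List.drop 1 (List.drop (j-1) arr) = List.drop ((j-1)+1) arr := List.drop_drop
      rw [hdrop] at h
      simpa [show (j-1)+1 = (j+1)-1 by omega] using h.symm
    rw [PySem.List.enumerate_cons, List.foldl_cons]
    have h1 := ih arr (j+1) x (c+1) (cnt.insert x (max (cnt.getD x 0) (c+1))) (by omega) hdrop'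
    have h2 := ih arr (j+1) x 1 (cnt.insert x (max (cnt.getD x 0) 1)) (by omega) hdrop'
    push_cast at h1 h2
    by_cases hx : x = prev
    · subst hx
      simpa [hget, hj0, show j ≠ 0 by omega, loopSpec] using h1
    · simpa [hget, hj0, show j ≠ 0 by omega, hx, loopSpec] using h2

-- the fold over the remaining runs, with pending run (v, c), is loopSpec
theorem lemB (xs : List Int) : ∀ (v c : Int) (cnt : PySem.Dict Int Int),
    (runsAux v c xs).foldl (fun cnt p => cnt.insert p.1 (max (cnt.getD p.1 0) p.2)) cnt
      = loopSpec v c (cnt.insert v (max (cnt.getD v 0) c)) xs := by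
  induction xs with
  | nil => intro v c cnt; simp [runsAux, loopSpec]
  | cons x xs ih =>
    intro v c cnt
    by_cases hx : x = v
    · subst hx
      have hmax : max (max (cnt.getD x 0) c) (c + 1) = max (cnt.getD x 0) (c + 1) := by
        rw [max_assoc, max_eq_right (by omega : c ≤ c + 1)]
      simp [runsAux, loopSpec, ih, PySem.Dict.getD_insert_self, PySem.Dict.insert_insert_self, hmax]
    · simp only [runsAux, if_neg hx, List.foldl_cons, ih, loopSpec]

theorem fA_eq_dictOfRuns (arr : List Int) : fA arr = dictOfRuns (runsR arr) := by
  cases arr with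
  | nil => rfl
  | cons x xs =>
    unfold fA dictOfRuns runsR
    rw [lemB]
    rw [PySem.List.enumerate_cons, List.foldl_cons]
    have h := lemA xs (x :: xs) 1 x 1 (PySem.Dict.empty.insert x (max (PySem.Dict.empty.getD x 0) 1)) (by omega) (by simp)
    push_cast at h
    simpa using h

theorem getD_foldl_insert_max (v : Int) (rs : List (Int × Int)) :
    ∀ d : PySem.Dict Int Int,
    (rs.foldl (fun cnt p => cnt.insert p.1 (max (cnt.getD p.1 0) p.2)) d).getD v 0
      = ((rs.filter (fun p => p.1 = v)).map (·.2)).foldl max (d.getD v 0) := by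
  induction rs with
  | nil => intro d; rfl
  | cons p t ih =>
    intro d
    rw [List.foldl_cons, ih]
    by_cases hp : p.1 = v
    · rw [List.filter_cons_of_pos (by simpa using hp), List.map_cons, List.foldl_cons,
        hp, PySem.Dict.getD_insert_self]
    · rw [List.filter_cons_of_neg (by simpa using hp),
        PySem.Dict.getD_insert_of_ne _ _ _ (fun h => hp h.symm)]

theorem getD_fA (arr : List Int) (v : Int) : (fA arr).getD v 0 = M arr v := by
  rw [fA_eq_dictOfRuns]
  unfold dictOfRuns M mx
  rw [getD_foldl_insert_max]
  simp [PySem.Dict.getD_empty]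

theorem keys_fA (arr : List Int) (v : Int) :
    v ∈ (fA arr).keys ↔ v ∈ (runsR arr).map (·.1) := by
  rw [fA_eq_dictOfRuns]
  unfold dictOfRuns
  rw [PySem.Dict.keys_foldl_insert_key]
  rw [show PySem.Dict.empty.keys = ([] : List Int) from rfl]
  rw [show PySem.Set.update ([] : List Int) ((runsR arr).map (·.1))
        = PySem.Set.ofList ((runsR arr).map (·.1)) from rfl]
  exact PySem.Set.mem_ofList _ _

-- ---- runsB = runsR, runs lengths positive ----

theorem runsB_eq_runsR (arr : List Int) : runsB arr = runsR arr := by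
  cases arr with
  | nil => rfl
  | cons x0 rest =>
    show _ = runsAux x0 1 rest
    have key : ∀ (l : List Int) (out : List (Int × Int)) (v c : Int),
        (let s := l.foldl (fun (s : List (Int × Int) × Int × Int) x =>
            if x = s.2.1 then (s.1, s.2.1, s.2.2 + 1)
            else (s.1 ++ [(s.2.1, s.2.2)], x, 1)) (out, v, c)
         s.1 ++ [(s.2.1, s.2.2)]) = out ++ runsAux v c l := by
      intro l
      induction l with
      | nil => intro out v c; simp [runsAux]
      | cons x t ih =>
        intro out v c
        by_cases hx : x = v
        · simpa [hx, runsAux] using ih out v (c + 1)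
        · simpa [hx, runsAux] using ih (out ++ [(v, c)]) x 1
    simpa using key rest [] x0 1

theorem runsAux_len_pos (xs : List Int) : ∀ (v c : Int), 1 ≤ c →
    ∀ p ∈ runsAux v c xs, 1 ≤ p.2 := by
  induction xs with
  | nil => intro v c hc p hp; simp [runsAux] at hp; subst hp; exact hc
  | cons x t ih =>
    intro v c hc p hp
    by_cases hx : x = v
    · rw [runsAux, if_pos hx] at hp; exact ih v (c + 1) (by omega) p hp
    · rw [runsAux, if_neg hx] at hp
      rcases List.mem_cons.mp hp with h | h
      · subst h; exact hc
      · exact ih x 1 (le_refl 1) p h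

theorem runsR_len_pos (arr : List Int) : ∀ p ∈ runsR arr, 1 ≤ p.2 := by
  cases arr with
  | nil => intro p hp; simp [runsR] at hp
  | cons x xs => exact runsAux_len_pos xs x 1 (le_refl 1)

-- ---- dvals: membership and nodup ----

theorem dvals_cons (p : Int × Int × Int) (t : List (Int × Int × Int)) :
    dvals (p :: t) = p.1 :: dvals (t.filter (fun q => q.1 ≠ p.1)) := by
  rw [dvals]

theorem mem_dvals_aux (n : Nat) : ∀ (l : List (Int × Int × Int)), l.length ≤ n → ∀ (w : Int),
    (w ∈ dvals l ↔ w ∈ l.map (·.1)) := by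
  induction n with
  | zero =>
    intro l hl w
    rw [List.length_eq_zero_iff.mp (Nat.le_zero.mp hl)]
    simp [dvals]
  | succ n ih =>
    intro l hl w
    cases l with
    | nil => simp [dvals]
    | cons p t =>
      have hlt : (t.filter (fun q => q.1 ≠ p.1)).length ≤ n :=
        le_trans (List.length_filter_le _ _) (by simpa using Nat.lt_succ_iff.mp (lt_of_lt_of_le (by simp) hl))
      rw [dvals_cons, List.map_cons, List.mem_cons, List.mem_cons, ih _ hlt]
      constructor
      · rintro (h | h)
        · exact Or.inl h
        · rcases List.mem_map.mp h with ⟨q, hq, hqw⟩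
          exact Or.inr (List.mem_map.mpr ⟨q, (List.mem_filter.mp hq).1, hqw⟩)
      · rintro (h | h)
        · exact Or.inl h
        · by_cases hw : w = p.1
          · exact Or.inl hw
          · rcases List.mem_map.mp h with ⟨q, hq, hqw⟩
            refine Or.inr (List.mem_map.mpr ⟨q, List.mem_filter.mpr ⟨hq, ?_⟩, hqw⟩)
            subst hqw; simpa using hw

theorem mem_dvals (l : List (Int × Int × Int)) (w : Int) :
    w ∈ dvals l ↔ w ∈ l.map (·.1) := mem_dvals_aux l.length l (le_refl _) w

theorem nodup_dvals_aux (n : Nat) : ∀ (l : List (Int × Int × Int)), l.length ≤ n →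
    (dvals l).Nodup := by
  induction n with
  | zero =>
    intro l hl
    rw [List.length_eq_zero_iff.mp (Nat.le_zero.mp hl)]
    simp [dvals]
  | succ n ih =>
    intro l hl
    cases l with
    | nil => simp [dvals]
    | cons p t =>
      have hlt : (t.filter (fun q => q.1 ≠ p.1)).length ≤ n :=
        le_trans (List.length_filter_le _ _) (by simpa using Nat.lt_succ_iff.mp (lt_of_lt_of_le (by simp) hl))
      rw [dvals_cons, List.nodup_cons]
      refine ⟨fun hmem => ?_, ih _ hlt⟩
      rcases List.mem_map.mp ((mem_dvals _ _).mp hmem) with ⟨q, hq, hqp⟩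
      have := (List.mem_filter.mp hq).2
      simp [hqp] at this

theorem nodup_dvals (l : List (Int × Int × Int)) : (dvals l).Nodup :=
  nodup_dvals_aux l.length l (le_refl _)

theorem n0_nonneg (l : List (Int × Int × Int)) (w : Int) : 0 ≤ n0 l w := mx_nonneg _
theorem n1_nonneg (l : List (Int × Int × Int)) (w : Int) : 0 ≤ n1 l w := mx_nonneg _

-- ---- the scan lemma ----

theorem scan_eq (l : List (Int × Int × Int)) : ∀ (res v b0 b1 : Int),
    l.Pairwise (fun p q => p.1 ≤ q.1) → (∀ p ∈ l, v ≤ p.1 ∧ 0 ≤ p.2.2) → 0 ≤ b0 → 0 ≤ b1 →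
    max (l.foldl stepScan (res, some v, b0, b1)).1
      ((l.foldl stepScan (res, some v, b0, b1)).2.2.1 + (l.foldl stepScan (res, some v, b0, b1)).2.2.2)
    = max res ((dvals (l.filter (fun p => p.1 ≠ v))).foldl
        (fun r w => max r (n0 l w + n1 l w))
        (max b0 (n0 l v) + max b1 (n1 l v))) := by
  induction l with
  | nil =>
    intro res v b0 b1 _ _ hb0 hb1
    simp [dvals, n0, n1, mx, max_eq_left hb0, max_eq_left hb1]
  | cons p t ih =>
    intro res v b0 b1 hpw hmem hb0 hb1
    obtain ⟨hle, hlen⟩ := hmem p (List.mem_cons_self ..)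
    have hhead := (List.pairwise_cons.mp hpw).1
    have hpw' := (List.pairwise_cons.mp hpw).2
    have hmem' : ∀ q ∈ t, v ≤ q.1 ∧ 0 ≤ q.2.2 := fun q hq => hmem q (List.mem_cons_of_mem _ hq)
    by_cases hv : p.1 = v
    · -- same group: no flush
      have efl : (p :: t).filter (fun q => q.1 ≠ v) = t.filter (fun q => q.1 ≠ v) := by
        rw [List.filter_cons_of_neg (by simp [hv])]
      have hcongr : ∀ (acc : Int), ∀ w ∈ dvals (t.filter (fun q => q.1 ≠ v)),
          max acc (n0 (p :: t) w + n1 (p :: t) w)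
            = max acc (n0 t w + n1 t w) := by
        intro acc w hw
        rcases List.mem_map.mp ((mem_dvals _ _).mp hw) with ⟨q, hq, hqw⟩
        have hwv : w ≠ v := by
          have := (List.mem_filter.mp hq).2; subst hqw; simpa using this
        have f0 : n0 (p :: t) w = n0 t w := by
          unfold n0
          rw [List.filter_cons_of_neg (by simp [hv]; intro h; exact absurd h hwv.symm)]
        have f1 : n1 (p :: t) w = n1 t w := by
          unfold n1
          rw [List.filter_cons_of_neg (by simp [hv]; intro h; exact absurd h hwv.symm)]
        rw [f0, f1]
      by_cases hs : p.2.1 = 0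
      · have hstep : stepScan (res, some v, b0, b1) p = (res, some v, max b0 p.2.2, b1) := by
          simp [stepScan, hv, hs]
        rw [List.foldl_cons, hstep,
          ih res v (max b0 p.2.2) b1 hpw' hmem' (le_max_of_le_left hb0) hb1]
        have e0 : n0 (p :: t) v = max p.2.2 (n0 t v) := by
          unfold n0
          rw [List.filter_cons_of_pos (by simp [hv, hs]), List.map_cons, mx_cons]
        have e1 : n1 (p :: t) v = n1 t v := by
          unfold n1
          rw [List.filter_cons_of_neg (by simp [hs])]
        rw [e0, e1, efl, ← max_assoc,
          PySem.List.foldl_congr_mem _ _ (fun r w => max r (n0 t w + n1 t w)) _ hcongr]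
      · have hstep : stepScan (res, some v, b0, b1) p = (res, some v, b0, max b1 p.2.2) := by
          simp [stepScan, hv, hs]
        rw [List.foldl_cons, hstep,
          ih res v b0 (max b1 p.2.2) hpw' hmem' hb0 (le_max_of_le_left hb1)]
        have e0 : n0 (p :: t) v = n0 t v := by
          unfold n0
          rw [List.filter_cons_of_neg (by simp [hs])]
        have e1 : n1 (p :: t) v = max p.2.2 (n1 t v) := by
          unfold n1
          rw [List.filter_cons_of_pos (by simp [hv, hs]), List.map_cons, mx_cons]
        rw [e0, e1, efl, ← max_assoc,
          PySem.List.foldl_congr_mem _ _ (fun r w => max r (n0 t w + n1 t w)) _ hcongr]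
    · -- new group: flush
      have hvlt : v < p.1 := lt_of_le_of_ne hle (fun h => hv h.symm)
      have htgt : ∀ q ∈ t, v < q.1 := fun q hq => lt_of_lt_of_le hvlt (hhead q hq)
      have hfil0 : (p :: t).filter (fun q => decide (q.1 = v ∧ q.2.1 = 0)) = [] := by
        rw [List.filter_eq_nil_iff]
        intro q hq
        rcases List.mem_cons.mp hq with h | h
        · subst h; simp [hv]
        · have hne : q.1 ≠ v := ne_of_gt (htgt q h)
          simp [hne]
      have hfil1 : (p :: t).filter (fun q => decide (q.1 = v ∧ q.2.1 ≠ 0)) = [] := by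
        rw [List.filter_eq_nil_iff]
        intro q hq
        rcases List.mem_cons.mp hq with h | h
        · subst h; simp [hv]
        · have hne : q.1 ≠ v := ne_of_gt (htgt q h)
          simp [hne]
      have hn0v : n0 (p :: t) v = 0 := by unfold n0; rw [hfil0]; rfl
      have hn1v : n1 (p :: t) v = 0 := by unfold n1; rw [hfil1]; rfl
      have hfl : (p :: t).filter (fun q => q.1 ≠ v) = p :: t := by
        rw [List.filter_eq_self]
        intro q hq
        rcases List.mem_cons.mp hq with h | h
        · subst h; simpa using hv
        · simpa using ne_of_gt (htgt q h)
      have hdv : dvals (p :: t) = p.1 :: dvals (t.filter (fun q => q.1 ≠ p.1)) :=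
        dvals_cons p t
      have hcongr : ∀ (acc : Int), ∀ w ∈ dvals (t.filter (fun q => q.1 ≠ p.1)),
          max acc (n0 (p :: t) w + n1 (p :: t) w)
            = max acc (n0 t w + n1 t w) := by
        intro acc w hw
        rcases List.mem_map.mp ((mem_dvals _ _).mp hw) with ⟨q, hq, hqw⟩
        have hwp : w ≠ p.1 := by
          have := (List.mem_filter.mp hq).2; subst hqw; simpa using this
        have f0 : n0 (p :: t) w = n0 t w := by
          unfold n0
          rw [List.filter_cons_of_neg (by simp; intro h; exact absurd h hwp.symm)]
        have f1 : n1 (p :: t) w = n1 t w := by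
          unfold n1
          rw [List.filter_cons_of_neg (by simp; intro h; exact absurd h hwp.symm)]
        rw [f0, f1]
      by_cases hs : p.2.1 = 0
      · have hstep : stepScan (res, some v, b0, b1) p
            = (max res (b0 + b1), some p.1, max 0 p.2.2, 0) := by
          simp [stepScan, hv, hs]
        have e0 : n0 (p :: t) p.1 = max p.2.2 (n0 t p.1) := by
          unfold n0
          rw [List.filter_cons_of_pos (by simp [hs]), List.map_cons, mx_cons]
        have e1 : n1 (p :: t) p.1 = n1 t p.1 := by
          unfold n1
          rw [List.filter_cons_of_neg (by simp [hs])]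
        have hb0' : max (max 0 p.2.2) (n0 t p.1) = max p.2.2 (n0 t p.1) := by
          rw [max_comm (0:Int) p.2.2, max_assoc, max_eq_right (n0_nonneg t p.1)]
        have hb1' : max (0:Int) (n1 t p.1) = n1 t p.1 := max_eq_right (n1_nonneg t p.1)
        rw [List.foldl_cons, hstep,
          ih (max res (b0 + b1)) p.1 (max 0 p.2.2) 0 hpw'
            (fun q hq => ⟨hhead q hq, (hmem' q hq).2⟩) (le_max_left 0 _) (le_refl 0),
          hb0', hb1', hn0v, hn1v, max_eq_left hb0, max_eq_left hb1, hfl, hdv, List.foldl_cons,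
          PySem.List.foldl_congr_mem _ _ (fun r w => max r (n0 t w + n1 t w)) _ hcongr,
          e0, e1, foldl_max_pull (fun w => n0 t w + n1 t w), ← max_assoc]
      · have hstep : stepScan (res, some v, b0, b1) p
            = (max res (b0 + b1), some p.1, 0, max 0 p.2.2) := by
          simp [stepScan, hv, hs]
        have e0 : n0 (p :: t) p.1 = n0 t p.1 := by
          unfold n0
          rw [List.filter_cons_of_neg (by simp [hs])]
        have e1 : n1 (p :: t) p.1 = max p.2.2 (n1 t p.1) := by
          unfold n1
          rw [List.filter_cons_of_pos (by simp [hs]), List.map_cons, mx_cons]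
        have hb1' : max (max 0 p.2.2) (n1 t p.1) = max p.2.2 (n1 t p.1) := by
          rw [max_comm (0:Int) p.2.2, max_assoc, max_eq_right (n1_nonneg t p.1)]
        have hb0' : max (0:Int) (n0 t p.1) = n0 t p.1 := max_eq_right (n0_nonneg t p.1)
        rw [List.foldl_cons, hstep,
          ih (max res (b0 + b1)) p.1 0 (max 0 p.2.2) hpw'
            (fun q hq => ⟨hhead q hq, (hmem' q hq).2⟩) (le_refl 0) (le_max_left 0 _),
          hb0', hb1', hn0v, hn1v, max_eq_left hb0, max_eq_left hb1, hfl, hdv, List.foldl_cons,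
          PySem.List.foldl_congr_mem _ _ (fun r w => max r (n0 t w + n1 t w)) _ hcongr,
          e0, e1, foldl_max_pull (fun w => n0 t w + n1 t w), ← max_assoc]

-- the full scan from the initial (1, none, 0, 0) state
theorem scan_full (l : List (Int × Int × Int))
    (hpw : l.Pairwise (fun p q => p.1 ≤ q.1)) (hlen : ∀ p ∈ l, 0 ≤ p.2.2) :
    max (l.foldl stepScan (1, none, 0, 0)).1
      ((l.foldl stepScan (1, none, 0, 0)).2.2.1 + (l.foldl stepScan (1, none, 0, 0)).2.2.2)
    = (dvals l).foldl (fun r w => max r (n0 l w + n1 l w)) 1 := by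
  cases l with
  | nil => simp [dvals]
  | cons p t =>
    have hstep0 : stepScan (1, none, 0, 0) p = stepScan (1, some p.1, 0, 0) p := by
      by_cases hs : p.2.1 = 0 <;> simp [stepScan, hs]
    have hmem : ∀ q ∈ p :: t, p.1 ≤ q.1 ∧ 0 ≤ q.2.2 := by
      intro q hq
      rcases List.mem_cons.mp hq with h | h
      · subst h; exact ⟨le_refl _, hlen q (List.mem_cons_self ..)⟩
      · exact ⟨(List.pairwise_cons.mp hpw).1 q h, hlen q (List.mem_cons_of_mem _ h)⟩
    have efl : (p :: t).filter (fun q => q.1 ≠ p.1) = t.filter (fun q => q.1 ≠ p.1) := by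
      rw [List.filter_cons_of_neg (by simp)]
    have hdv : dvals (p :: t) = p.1 :: dvals (t.filter (fun q => q.1 ≠ p.1)) :=
      dvals_cons p t
    conv_lhs => rw [List.foldl_cons, hstep0, ← List.foldl_cons]
    rw [scan_eq (p :: t) 1 p.1 0 0 hpw hmem (le_refl 0) (le_refl 0),
      max_eq_right (n0_nonneg (p :: t) p.1), max_eq_right (n1_nonneg (p :: t) p.1),
      efl, hdv, List.foldl_cons,
      foldl_max_pull (fun w => n0 (p :: t) w + n1 (p :: t) w)]

-- ---- assembling both sides ----

theorem n0_tag (A' B' : List Int) (w : Int) :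
    n0 ((runsB A').map (fun p => (p.1, (0:Int), p.2))
        ++ (runsB B').map (fun p => (p.1, (1:Int), p.2))) w = M A' w := by
  unfold n0 M
  rw [List.filter_append]
  have h1 : ((runsB B').map (fun p => (p.1, (1:Int), p.2))).filter
      (fun t => decide (t.1 = w ∧ t.2.1 = 0)) = [] := by
    rw [List.filter_eq_nil_iff]
    intro q hq
    rcases List.mem_map.mp hq with ⟨r, _, hr⟩
    subst hr; simp
  have h0 : ((runsB A').map (fun p => (p.1, (0:Int), p.2))).filter
      (fun t => decide (t.1 = w ∧ t.2.1 = 0))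
      = ((runsB A').filter (fun p => p.1 = w)).map (fun p => (p.1, (0:Int), p.2)) := by
    rw [List.filter_map]
    congr 1
    apply List.filter_congr
    intro q _
    simp
  rw [h1, h0, List.append_nil, List.map_map, runsB_eq_runsR]
  rfl

theorem n1_tag (A' B' : List Int) (w : Int) :
    n1 ((runsB A').map (fun p => (p.1, (0:Int), p.2))
        ++ (runsB B').map (fun p => (p.1, (1:Int), p.2))) w = M B' w := by
  unfold n1 M
  rw [List.filter_append]
  have h0 : ((runsB A').map (fun p => (p.1, (0:Int), p.2))).filter
      (fun t => decide (t.1 = w ∧ t.2.1 ≠ 0)) = [] := by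
    rw [List.filter_eq_nil_iff]
    intro q hq
    rcases List.mem_map.mp hq with ⟨r, _, hr⟩
    subst hr; simp
  have h1 : ((runsB B').map (fun p => (p.1, (1:Int), p.2))).filter
      (fun t => decide (t.1 = w ∧ t.2.1 ≠ 0))
      = ((runsB B').filter (fun p => p.1 = w)).map (fun p => (p.1, (1:Int), p.2)) := by
    rw [List.filter_map]
    congr 1
    apply List.filter_congr
    intro q _
    simp
  rw [h1, h0, List.nil_append, List.map_map, runsB_eq_runsR]
  rfl

-- n0/n1 are invariant under permutation of the tagged list
theorem n0_perm {l₁ l₂ : List (Int × Int × Int)} (hp : l₁.Perm l₂) (w : Int) :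
    n0 l₁ w = n0 l₂ w := mx_perm ((hp.filter _).map _)

theorem n1_perm {l₁ l₂ : List (Int × Int × Int)} (hp : l₁.Perm l₂) (w : Int) :
    n1 l₁ w = n1 l₂ w := mx_perm ((hp.filter _).map _)

theorem alt_eq (N : Int) (A B : List Int) :
    solve_alt N A B =
      (dvals (PySem.List.sorted ((runsB A).map (fun p => (p.1, (0:Int), p.2))
          ++ (runsB B).map (fun p => (p.1, (1:Int), p.2))) (fun t => t.1) false)).foldl
        (fun r w => max r (M A w + M B w)) 1 := by
  have hperm := PySem.List.sorted_perm
    ((runsB A).map (fun p => (p.1, (0:Int), p.2)) ++ (runsB B).map (fun p => (p.1, (1:Int), p.2)))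
    (fun t => t.1) false
  have hpw := PySem.List.sorted_pairwise
    ((runsB A).map (fun p => (p.1, (0:Int), p.2)) ++ (runsB B).map (fun p => (p.1, (1:Int), p.2)))
    (fun t => t.1)
  have hlen : ∀ p ∈ PySem.List.sorted
      ((runsB A).map (fun p => (p.1, (0:Int), p.2)) ++ (runsB B).map (fun p => (p.1, (1:Int), p.2)))
      (fun t => t.1) false, 0 ≤ p.2.2 := by
    intro p hp
    have := hperm.mem_iff.mp hp
    rcases List.mem_append.mp this with h | h
    · rcases List.mem_map.mp h with ⟨r, hr, hrp⟩
      rw [runsB_eq_runsR] at hr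
      have := runsR_len_pos A r hr
      subst hrp; simpa using by omega
    · rcases List.mem_map.mp h with ⟨r, hr, hrp⟩
      rw [runsB_eq_runsR] at hr
      have := runsR_len_pos B r hr
      subst hrp; simpa using by omega
  show max _ _ = _
  rw [scan_full _ hpw hlen]
  apply PySem.List.foldl_congr_mem
  intro acc w _
  rw [n0_perm hperm, n1_perm hperm, n0_tag, n1_tag]

theorem solveA_eq (N : Int) (A B : List Int) :
    solve N A B =
      (PySem.Set.ofList ((fA A).keys ++ (fA B).keys)).foldl
        (fun r k => max r (M A k + M B k)) 1 := by
  unfold solve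
  apply PySem.List.foldl_congr_mem
  intro acc k _
  rw [getD_fA, getD_fA]

theorem keys_perm_dvals (A B : List Int) :
    (PySem.Set.ofList ((fA A).keys ++ (fA B).keys)).Perm
      (dvals (PySem.List.sorted ((runsB A).map (fun p => (p.1, (0:Int), p.2))
          ++ (runsB B).map (fun p => (p.1, (1:Int), p.2))) (fun t => t.1) false)) := by
  apply List.perm_of_nodup_nodup_toFinset_eq (PySem.Set.nodup_ofList _) (nodup_dvals _)
  ext w
  simp only [List.mem_toFinset, PySem.Set.mem_ofList, List.mem_append, keys_fA, mem_dvals,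
    List.mem_map, PySem.List.mem_sorted, runsB_eq_runsR]
  constructor
  · rintro (⟨r, hr, hrw⟩ | ⟨r, hr, hrw⟩)
    · exact ⟨(r.1, 0, r.2), Or.inl ⟨r, hr, rfl⟩, hrw⟩
    · exact ⟨(r.1, 1, r.2), Or.inr ⟨r, hr, rfl⟩, hrw⟩
  · rintro ⟨q, (⟨r, hr, hrq⟩ | ⟨r, hr, hrq⟩), hqw⟩
    · exact Or.inl ⟨r, hr, by subst hrq; exact hqw⟩
    · exact Or.inr ⟨r, hr, by subst hrq; exact hqw⟩

-- ===== VERDICT (by name: the statement is the Claim_ definition above) =====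
theorem solve_spec : Claim_equal_solve := by
  intro N A B _hD
  unfold Spec_solve
  rw [solveA_eq, alt_eq]
  exact foldl_hmax_perm (fun w => M A w + M B w) (keys_perm_dvals A B) 1
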